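-- pv_equiv track=rewrite | github.com/markusmkim/RL-MCTS-Hex | SimWorld/hexManager.py | print_winner
-- ===== SOURCE A (Python) =====
-- def print_winner(board):
--     possible_chains = []
--     for i in range(len(board)):
--         if board[0][i] == 1:
--             possible_chains.append(i)
--
--     for i in range(1, len(board)):
--         next_possible_chains = []
--         for cell in possible_chains:
--             if board[i][cell] == 1:
--                 next_possible_chains.append(cell)
--             if cell < len(board) - 1:
--                 if board[i][cell + 1] == 1:
--                     next_possible_chains.append(cell + 1)
--         possible_chains = next_possible_chains
--
--     if len(possible_chains) > 0:
--         return 1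
--
--     # try to find a winning chain for red (player 2)
--     possible_chains = []
--     for i in range(len(board)):
--         if board[i][0] == 2:
--             possible_chains.append(i)
--
--     for i in range(1, len(board)):
--         next_possible_chains = []
--         for cell in possible_chains:
--             if board[cell][i] == 2:
--                 next_possible_chains.append(cell)
--             if cell < len(board) - 1:
--                 if board[cell + 1][i] == 2:
--                     next_possible_chains.append(cell + 1)
--         possible_chains = next_possible_chains
--
--     if len(possible_chains) > 0:
--         return 2
--
--     return 0
-- ===== SOURCE B (Python) =====
-- def print_winner(board):
--     n = len(board)
--
--     def wins(player, cell):
--         # reachable columns (as a set) row by row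
--         frontier = {c for c in range(n) if cell(0, c) == player}
--         for i in range(1, n):
--             frontier = {c for c in range(n)
--                         if cell(i, c) == player
--                         and (c in frontier or (c > 0 and c - 1 in frontier))}
--         return bool(frontier)
--
--     if wins(1, lambda i, c: board[i][c]):
--         return 1
--     if wins(2, lambda i, c: board[c][i]):
--         return 2
--     return 0
-- ===== Notes on version B (the rewrite author's own statement) =====
-- stated objective: alternative
-- what changed: B replaces A's duplicate-accumulating frontier lists by a per-row deduplicated set of reachable columns, rebuilt with one membership scan over the n columns, and shares one helper for both players instead of two copied passes.
-- outside the precondition, e.g. on print_winner([[0, 0], [0]]): A returns 0, B raises IndexError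
import Mathlib
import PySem

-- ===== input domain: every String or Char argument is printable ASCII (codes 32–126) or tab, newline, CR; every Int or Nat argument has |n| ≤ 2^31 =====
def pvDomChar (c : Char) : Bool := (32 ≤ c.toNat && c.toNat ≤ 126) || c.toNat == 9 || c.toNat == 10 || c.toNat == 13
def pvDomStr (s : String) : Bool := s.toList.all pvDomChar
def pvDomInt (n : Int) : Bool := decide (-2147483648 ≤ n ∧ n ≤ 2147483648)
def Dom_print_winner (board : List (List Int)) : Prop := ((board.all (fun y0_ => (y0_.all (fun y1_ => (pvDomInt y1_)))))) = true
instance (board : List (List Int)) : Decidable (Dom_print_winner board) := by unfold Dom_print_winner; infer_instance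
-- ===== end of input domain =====

-- B rebuilds a deduplicated set of reachable columns per row by scanning the columns,
-- instead of A's duplicate-accumulating frontier lists; return values proved equal on Pre_.

-- board[i][j]; in range under Pre_print_winner (Python raises out of range, excluded by Pre_)
def pvCell (board : List (List Int)) (i j : Nat) : Int := (board.getD i []).getD j 0

-- ===== PORT A =====
def print_winner (board : List (List Int)) : Int :=
  let n := board.length
  let chains1 := (List.range n).foldl
    (fun acc i => if pvCell board 0 i = 1 then acc ++ [i] else acc) ([] : List Nat)
  let chains1 := (List.range' 1 (n - 1)).foldl
    (fun chains i => chains.foldl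
      (fun acc cell =>
        let acc2 := if pvCell board i cell = 1 then acc ++ [cell] else acc
        if cell < n - 1 then
          (if pvCell board i (cell + 1) = 1 then acc2 ++ [cell + 1] else acc2)
        else acc2) []) chains1
  if chains1.length > 0 then 1
  else
    let chains2 := (List.range n).foldl
      (fun acc i => if pvCell board i 0 = 2 then acc ++ [i] else acc) ([] : List Nat)
    let chains2 := (List.range' 1 (n - 1)).foldl
      (fun chains i => chains.foldl
        (fun acc cell =>
          let acc2 := if pvCell board cell i = 2 then acc ++ [cell] else acc
          if cell < n - 1 then
            (if pvCell board (cell + 1) i = 2 then acc2 ++ [cell + 1] else acc2)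
          else acc2) []) chains2
    if chains2.length > 0 then 2 else 0

-- ===== PORT B =====
def pvWins (n : Nat) (player : Int) (cell : Nat → Nat → Int) : Bool :=
  let frontier := (List.range n).filter (fun c => cell 0 c == player)
  let frontier := (List.range' 1 (n - 1)).foldl
    (fun frontier i => (List.range n).filter
      (fun c => cell i c == player &&
        (frontier.contains c || (decide (0 < c) && frontier.contains (c - 1))))) frontier
  !frontier.isEmpty

def print_winner_alt (board : List (List Int)) : Int :=
  let n := board.length
  if pvWins n 1 (fun i c => pvCell board i c) then 1
  else if pvWins n 2 (fun i c => pvCell board c i) then 2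
  else 0

-- ===== PRECONDITION & SPEC =====
-- Pre_ excludes ragged boards (some row shorter than the number of rows): Python A indexes
-- cells up to column len(board)-1 and in general raises IndexError there; it excludes some
-- ragged boards on which A's sparse frontier happens never to touch a missing cell and A
-- still returns (see the cite), where B raises.
def Pre_print_winner (board : List (List Int)) : Prop :=
  ∀ row ∈ board, board.length ≤ row.length
instance (board : List (List Int)) : Decidable (Pre_print_winner board) := by
  unfold Pre_print_winner; infer_instance

def pvWitness_print_winner : List (List Int) := [[1, 2], [1, 0]]

def Spec_print_winner (board : List (List Int)) (out : Int) : Prop := out = print_winner_alt board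
instance (board : List (List Int)) (out : Int) : Decidable (Spec_print_winner board out) := by unfold Spec_print_winner; infer_instance

-- ===== CLAIM (what is proved, stated in full; the proofs are below) =====
def Claim_equal_print_winner : Prop := ∀ (board : List (List Int)), Dom_print_winner board → Pre_print_winner board → Spec_print_winner board (print_winner board)

-- ===== LEMMAS AND PROOFS =====

-- the one-cell emission of A's inner loop body
def pvEmitA (g : Nat → Nat → Int) (p : Int) (n i d : Nat) : List Nat :=
  (if g i d = p then [d] else []) ++ (if d < n - 1 ∧ g i (d + 1) = p then [d + 1] else [])

lemma mem_pvEmitA (g : Nat → Nat → Int) (p : Int) (n i d c : Nat) :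
    c ∈ pvEmitA g p n i d ↔
      (c = d ∧ g i c = p) ∨ (d < n - 1 ∧ c = d + 1 ∧ g i c = p) := by
  unfold pvEmitA
  split_ifs <;> simp_all <;> aesop

-- membership in A's inner fold (one row expansion), for any accumulator
lemma stepA_mem (g : Nat → Nat → Int) (p : Int) (n i : Nat) (chains acc : List Nat) (c : Nat) :
    c ∈ chains.foldl
      (fun acc cell =>
        let acc2 := if g i cell = p then acc ++ [cell] else acc
        if cell < n - 1 then
          (if g i (cell + 1) = p then acc2 ++ [cell + 1] else acc2)
        else acc2) acc
    ↔ c ∈ acc ∨ (c ∈ chains ∧ g i c = p) ∨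
        (∃ d, d ∈ chains ∧ d < n - 1 ∧ c = d + 1 ∧ g i c = p) := by
  have hfun : (fun (acc : List Nat) cell =>
        let acc2 := if g i cell = p then acc ++ [cell] else acc
        if cell < n - 1 then
          (if g i (cell + 1) = p then acc2 ++ [cell + 1] else acc2)
        else acc2) = fun acc cell => acc ++ pvEmitA g p n i cell := by
    funext acc cell
    dsimp only
    unfold pvEmitA
    split_ifs <;> simp_all
  rw [hfun, PySem.List.foldl_append_eq_flatMap]
  simp only [List.mem_append, List.mem_flatMap, mem_pvEmitA]
  constructor
  · rintro (h | ⟨d, hd, ⟨rfl, hg⟩ | ⟨hdn, rfl, hg⟩⟩)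
    · exact Or.inl h
    · exact Or.inr (Or.inl ⟨hd, hg⟩)
    · exact Or.inr (Or.inr ⟨d, hd, hdn, rfl, hg⟩)
  · rintro (h | ⟨hc, hg⟩ | ⟨d, hd, hdn, rfl, hg⟩)
    · exact Or.inl h
    · exact Or.inr ⟨c, hc, Or.inl ⟨rfl, hg⟩⟩
    · exact Or.inr ⟨d, hd, Or.inr ⟨hdn, rfl, hg⟩⟩

-- membership in B's per-row filter
lemma stepB_mem (g : Nat → Nat → Int) (p : Int) (n i : Nat) (frontier : List Nat) (c : Nat) :
    c ∈ (List.range n).filter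
      (fun c => g i c == p &&
        (frontier.contains c || (decide (0 < c) && frontier.contains (c - 1))))
    ↔ c < n ∧ g i c = p ∧ (c ∈ frontier ∨ (0 < c ∧ c - 1 ∈ frontier)) := by
  simp [List.mem_filter]

-- the two frontiers agree as sets after any run of the row loop, and stay below n
lemma loop_inv (g : Nat → Nat → Int) (p : Int) (n : Nat) (idxs : List Nat)
    (chains frontier : List Nat)
    (hmem : ∀ c, c ∈ chains ↔ c ∈ frontier) (hlt : ∀ c ∈ chains, c < n) :
    (∀ c, c ∈ idxs.foldl
        (fun chains i => chains.foldl
          (fun acc cell =>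
            let acc2 := if g i cell = p then acc ++ [cell] else acc
            if cell < n - 1 then
              (if g i (cell + 1) = p then acc2 ++ [cell + 1] else acc2)
            else acc2) []) chains
      ↔ c ∈ idxs.foldl
        (fun frontier i => (List.range n).filter
          (fun c => g i c == p &&
            (frontier.contains c || (decide (0 < c) && frontier.contains (c - 1))))) frontier)
    ∧ (∀ c ∈ idxs.foldl
        (fun chains i => chains.foldl
          (fun acc cell =>
            let acc2 := if g i cell = p then acc ++ [cell] else acc
            if cell < n - 1 then
              (if g i (cell + 1) = p then acc2 ++ [cell + 1] else acc2)
            else acc2) []) chains, c < n) := by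
  induction idxs generalizing chains frontier with
  | nil => exact ⟨hmem, hlt⟩
  | cons i tl ih =>
    simp only [List.foldl_cons]
    apply ih
    · intro c
      rw [stepA_mem, stepB_mem]
      constructor
      · rintro (h | ⟨hc, hg⟩ | ⟨d, hd, hdn, rfl, hg⟩)
        · simp at h
        · exact ⟨hlt c hc, hg, Or.inl ((hmem c).mp hc)⟩
        · exact ⟨by omega, hg, Or.inr ⟨by omega, by simpa using (hmem d).mp hd⟩⟩
      · rintro ⟨hcn, hg, hc | ⟨hc0, hc1⟩⟩
        · exact Or.inr (Or.inl ⟨(hmem c).mpr hc, hg⟩)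
        · refine Or.inr (Or.inr ⟨c - 1, (hmem _).mpr hc1, by omega, by omega, hg⟩)
    · intro c hc
      rw [stepA_mem] at hc
      rcases hc with h | ⟨hc, _⟩ | ⟨d, hd, hdn, rfl, _⟩
      · simp at h
      · exact hlt c hc
      · omega

-- one full pass of A (blue or red, via the accessor g) is nonempty iff pvWins
lemma pass_eq (g : Nat → Nat → Int) (p : Int) (n : Nat) :
    (((List.range' 1 (n - 1)).foldl
        (fun chains i => chains.foldl
          (fun acc cell =>
            let acc2 := if g i cell = p then acc ++ [cell] else acc
            if cell < n - 1 then
              (if g i (cell + 1) = p then acc2 ++ [cell + 1] else acc2)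
            else acc2) [])
        ((List.range n).foldl
          (fun acc i => if g 0 i = p then acc ++ [i] else acc) ([] : List Nat))).length > 0)
    ↔ pvWins n p g = true := by
  have init_mem : ∀ c, c ∈ (List.range n).foldl
      (fun acc i => if g 0 i = p then acc ++ [i] else acc) ([] : List Nat)
      ↔ c ∈ (List.range n).filter (fun c => g 0 c == p) := by
    intro c
    rw [PySem.List.foldl_append_ite_eq_filter]
    simp
  have init_lt : ∀ c ∈ (List.range n).foldl
      (fun acc i => if g 0 i = p then acc ++ [i] else acc) ([] : List Nat), c < n := by
    intro c hc
    rw [PySem.List.foldl_append_ite_eq_filter] at hc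
    simp at hc
    exact hc.1
  obtain ⟨hm, _⟩ := loop_inv g p n (List.range' 1 (n - 1)) _ _ init_mem init_lt
  unfold pvWins
  simp only [gt_iff_lt, List.length_pos_iff_ne_nil, Bool.not_eq_true',
    List.isEmpty_eq_false_iff_exists_mem]
  constructor
  · intro h
    obtain ⟨c, hc⟩ := List.exists_mem_of_ne_nil _ h
    exact ⟨c, (hm c).mp hc⟩
  · rintro ⟨c, hc⟩
    exact List.ne_nil_of_mem ((hm c).mpr hc)

-- ===== VERDICT (by name: the statement is the Claim_ definition above) =====
theorem print_winner_spec : Claim_equal_print_winner := by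
  intro board _ _
  unfold Spec_print_winner print_winner print_winner_alt
  have h1 := pass_eq (fun i c => pvCell board i c) 1 board.length
  have h2 := pass_eq (fun i c => pvCell board c i) 2 board.length
  simp only [h1, h2]
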